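-- pv_equiv track=rewrite | github.com/RomanChertkov/GeekBrains-python-seminars | seminar_4/task_3.py | unique_numbers
-- ===== SOURCE A (Python) =====
-- def unique_numbers(numbers:list[int])->list[int]:
--     """Search unique numbers in list"""
--     dictionary = {}
--     unique = []
--
--     for item in numbers:
--         if dictionary.get(item) is None:
--             dictionary[item] = 1
--         else:
--             dictionary[item] +=1
--
--     for key, value in dictionary.items():
--         if value == 1:
--             unique.append(key)
--
--     return unique
-- ===== SOURCE B (Python) =====
-- def unique_numbers(numbers: list[int]) -> list[int]:
--     """Search unique numbers in list"""
--     seen = set()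
--     duplicated = set()
--     for x in numbers:
--         if x in seen:
--             duplicated.add(x)
--         else:
--             seen.add(x)
--     result = []
--     for x in numbers:
--         if x in seen and x not in duplicated:
--             result.append(x)
--     return result
-- ===== Notes on version B (the rewrite author's own statement) =====
-- stated objective: idiomatic
-- what changed: Replaces the count-dictionary plus a pass over the dict's items with two sets (seen/duplicated) maintained in one pass and a final pass over the input list itself, appending elements seen but never duplicated.
import Mathlib
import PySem

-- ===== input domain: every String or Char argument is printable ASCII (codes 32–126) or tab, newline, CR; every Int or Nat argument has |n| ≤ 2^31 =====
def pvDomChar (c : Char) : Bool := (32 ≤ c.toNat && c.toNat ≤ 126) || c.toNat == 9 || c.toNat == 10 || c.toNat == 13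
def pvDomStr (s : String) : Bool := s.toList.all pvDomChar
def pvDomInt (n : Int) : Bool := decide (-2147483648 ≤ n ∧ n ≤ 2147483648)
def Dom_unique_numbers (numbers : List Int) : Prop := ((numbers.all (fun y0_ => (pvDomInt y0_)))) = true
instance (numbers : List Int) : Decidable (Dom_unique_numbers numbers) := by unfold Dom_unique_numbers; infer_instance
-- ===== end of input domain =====

-- B replaces A's count-dictionary and pass over the dict items by two sets (seen/duplicated)
-- and a final pass over the input list itself (objective: idiomatic; same cost).

-- ===== PORT A =====
-- loop body of A's first for-loop: dictionary.get(item) is None → dictionary[item] = 1, else += 1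
def pvAStep (d : PySem.Dict Int Int) (item : Int) : PySem.Dict Int Int :=
  match d.get? item with
  | none => d.insert item 1
  | some v => d.insert item (v + 1)

def unique_numbers (numbers : List Int) : List Int :=
  let dictionary : PySem.Dict Int Int := numbers.foldl pvAStep PySem.Dict.empty
  dictionary.items.foldl (fun unique kv => if kv.2 == 1 then unique ++ [kv.1] else unique) []

-- ===== PORT B =====
-- loop body of B's first for-loop: x in seen → duplicated.add(x), else seen.add(x)
def pvBStep (p : PySem.Set Int × PySem.Set Int) (x : Int) : PySem.Set Int × PySem.Set Int :=
  if List.contains p.1 x then (p.1, PySem.Set.add p.2 x) else (PySem.Set.add p.1 x, p.2)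

def unique_numbers_alt (numbers : List Int) : List Int :=
  let sd := numbers.foldl pvBStep ((PySem.Set.empty : PySem.Set Int), (PySem.Set.empty : PySem.Set Int))
  numbers.foldl
    (fun result x => if List.contains sd.1 x && !(List.contains sd.2 x) then result ++ [x] else result) []

-- ===== PRECONDITION & SPEC =====
def Spec_unique_numbers (numbers : List Int) (out : List Int) : Prop := out = unique_numbers_alt numbers
instance (numbers : List Int) (out : List Int) : Decidable (Spec_unique_numbers numbers out) := by unfold Spec_unique_numbers; infer_instance

-- ===== CLAIM (what is proved, stated in full; the proofs are below) =====
def Claim_equal_unique_numbers : Prop := ∀ (numbers : List Int), Dom_unique_numbers numbers → Spec_unique_numbers numbers (unique_numbers numbers)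

-- ===== LEMMAS AND PROOFS =====

-- find? over the key list: the first (and only) match of x is x itself
lemma pvFind (s : List Int) (x : Int) (hx : x ∈ s) :
    List.find? (fun k => k == x) s = some x := by
  induction s with
  | nil => simp at hx
  | cons a s ih =>
    by_cases h : a = x
    · subst h; simp
    · rw [List.find?_cons_of_neg (by simpa using h)]
      apply ih
      cases hx with
      | head => exact absurd rfl h
      | tail _ h' => exact h'

-- A's first loop, one step: on a dict whose items are s paired with counts c, pvAStep x
-- bumps the count of x (a fresh x enters with count 1, i.e. c x + 1 when c x = 0).
lemma pvAStep_map (s : List Int) (c : Int → Int) (x : Int) (h0 : x ∉ s → c x = 0) :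
    pvAStep ⟨s.map (fun k => (k, c k))⟩ x
      = ⟨(PySem.Set.add s x).map (fun k => (k, if k = x then c k + 1 else c k))⟩ := by
  by_cases hx : x ∈ s
  · have hfind : List.find? (fun p => p.1 == x) (s.map (fun k => (k, c k))) = some (x, c x) := by
      rw [List.find?_map]
      have : (fun (p : Int × Int) => p.1 == x) ∘ (fun k => (k, c k)) = fun k => k == x := rfl
      rw [this, pvFind s x hx]; rfl
    have hget : PySem.Dict.get? ⟨s.map (fun k => (k, c k))⟩ x = some (c x) := by
      simp [PySem.Dict.get?, hfind]
    have hcont : PySem.Dict.contains ⟨s.map (fun k => (k, c k))⟩ x = true := by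
      simp only [PySem.Dict.contains, List.any_map, List.any_eq_true]
      exact ⟨x, hx, by simp⟩
    have hadd : PySem.Set.add s x = s := by simp [PySem.Set.add, List.contains_eq_mem, hx]
    simp only [pvAStep, hget, PySem.Dict.insert, hcont, if_true, hadd]
    congr 1
    rw [List.map_map]
    apply List.map_congr_left
    intro k _
    by_cases hk : k = x
    · subst hk; simp
    · simp [hk]
  · have hfind : List.find? (fun p => p.1 == x) (s.map (fun k => (k, c k))) = none := by
      rw [List.find?_map]
      have : List.find? (fun k => k == x) s = none := by
        rw [List.find?_eq_none]
        intro k hk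
        simp only [beq_iff_eq]
        exact fun h => hx (h ▸ hk)
      simp [Function.comp_def, this]
    have hget : PySem.Dict.get? ⟨s.map (fun k => (k, c k))⟩ x = none := by
      simp [PySem.Dict.get?, hfind]
    have hcont : PySem.Dict.contains ⟨s.map (fun k => (k, c k))⟩ x = false := by
      simp only [PySem.Dict.contains, List.any_map, List.any_eq_false]
      intro k hk
      simp only [Function.comp_apply, beq_iff_eq]
      exact fun h => hx (h ▸ hk)
    have hadd : PySem.Set.add s x = s ++ [x] := by simp [PySem.Set.add, List.contains_eq_mem, hx]
    simp only [pvAStep, hget, PySem.Dict.insert, hcont, hadd, if_neg (Bool.false_ne_true)]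
    congr 1
    rw [List.map_append]
    congr 1
    · apply List.map_congr_left
      intro k hk
      have : k ≠ x := fun h => hx (h ▸ hk)
      simp [this]
    · simp [h0 hx]

-- A's first loop: the dict built over xs from (s, c) pairs the seen-set with the running counts.
lemma pvAFold (xs : List Int) : ∀ (s : List Int) (c : Int → Int), (∀ k, k ∉ s → c k = 0) →
    List.foldl pvAStep ⟨s.map (fun k => (k, c k))⟩ xs
      = ⟨(List.foldl PySem.Set.add s xs).map (fun k => (k, c k + (xs.count k : Int)))⟩ := by
  induction xs with
  | nil => intro s c h; simp
  | cons x xs ih =>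
    intro s c h
    rw [List.foldl_cons, pvAStep_map s c x (h x), ih _ _ ?h0]
    case h0 =>
      intro k hk
      rw [PySem.Set.mem_add] at hk
      push Not at hk
      rw [if_neg hk.2, h k hk.1]
    rw [List.foldl_cons]
    congr 1
    apply List.map_congr_left
    intro k _
    by_cases hk : k = x
    · subst hk
      simp
      ring
    · have : (x == k) = false := by simpa using fun h => hk h.symm
      simp [List.count_cons, this, if_neg hk]

-- B's first loop: membership in the two sets after folding xs from (s, d).
lemma pvBFold (xs : List Int) : ∀ (s d : List Int) (k : Int),
    (k ∈ (List.foldl pvBStep (s, d) xs).1 ↔ k ∈ s ∨ k ∈ xs) ∧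
    (k ∈ (List.foldl pvBStep (s, d) xs).2 ↔ k ∈ d ∨ (k ∈ s ∧ k ∈ xs) ∨ 2 ≤ xs.count k) := by
  induction xs with
  | nil => intro s d k; simp
  | cons x xs ih =>
    intro s d k
    rw [List.foldl_cons]
    by_cases hx : x ∈ s
    · rw [show pvBStep (s, d) x = (s, PySem.Set.add d x) by
        simp [pvBStep, List.contains_eq_mem, hx]]
      obtain ⟨h1, h2⟩ := ih s (PySem.Set.add d x) k
      refine ⟨h1.trans ?_, h2.trans ?_⟩
      · by_cases hk : k = x
        · subst hk; simp [hx]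
        · simp [List.mem_cons, hk]
      · rw [PySem.Set.mem_add]
        by_cases hk : k = x
        · subst hk
          simp [hx, List.mem_cons]
        · have hxk : (x == k) = false := by simpa using fun h => hk h.symm
          simp [List.mem_cons, hk, List.count_cons, hxk]
    · rw [show pvBStep (s, d) x = (PySem.Set.add s x, d) by
        simp [pvBStep, List.contains_eq_mem, hx]]
      obtain ⟨h1, h2⟩ := ih (PySem.Set.add s x) d k
      refine ⟨h1.trans ?_, h2.trans ?_⟩
      · rw [PySem.Set.mem_add]
        by_cases hk : k = x
        · subst hk; simp
        · simp [List.mem_cons, hk]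
      · rw [PySem.Set.mem_add]
        by_cases hk : k = x
        · subst hk
          have hcnt : (k :: xs).count k = xs.count k + 1 := by simp
          have hmemc : 1 ≤ xs.count k ↔ k ∈ xs := by
            rw [← List.count_pos_iff]
            omega
          constructor
          · rintro (hd | (⟨_, hxs⟩ | hge2))
            · exact Or.inl hd
            · right; right
              have := hmemc.2 hxs
              rw [hcnt]; omega
            · right; right
              have : k ∈ xs := by rw [← hmemc]; omega
              rw [hcnt]; omega
          · rintro (hd | (⟨hks, _⟩ | hge2))
            · exact Or.inl hd
            · exact absurd hks hx
            · rw [hcnt] at hge2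
              by_cases hin : k ∈ xs
              · right; left; exact ⟨Or.inr rfl, hin⟩
              · have : xs.count k = 0 := by
                  rw [List.count_eq_zero]; exact hin
                omega
        · have hxk : (x == k) = false := by simpa using fun h => hk h.symm
          simp [List.mem_cons, hk, List.count_cons, hxk]

-- the seen-set fold produces a sublist of the input
lemma pvOfList_sublist (xs : List Int) : ∀ (s l : List Int), List.Sublist s l →
    List.Sublist (List.foldl PySem.Set.add s xs) (l ++ xs) := by
  induction xs with
  | nil => intro s l h; simpa using h
  | cons x xs ih =>
    intro s l h
    simp only [List.foldl_cons]
    have hadd : List.Sublist (PySem.Set.add s x) (l ++ [x]) := by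
      unfold PySem.Set.add
      split
      · exact h.trans (by simp)
      · exact h.append (List.Sublist.refl [x])
    simpa using ih _ _ hadd

-- filtering to count-1 elements gives the same list on the dedup and on the input itself
lemma pvFilter_dedup (numbers : List Int) :
    List.filter (fun k => decide (numbers.count k = 1)) (PySem.Set.ofList numbers)
      = List.filter (fun k => decide (numbers.count k = 1)) numbers := by
  set q : Int → Bool := fun k => decide (numbers.count k = 1) with hq
  have hsub : List.Sublist (PySem.Set.ofList numbers) numbers := by
    simpa using pvOfList_sublist numbers [] [] (List.Sublist.refl [])
  have hfsub := hsub.filter q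
  apply hfsub.eq_of_length
  have hnd2 : (List.filter q numbers).Nodup := by
    rw [List.nodup_iff_count_le_one]
    intro a
    by_cases ha : q a = true
    · rw [List.count_filter ha]
      have : numbers.count a = 1 := by simpa [hq] using ha
      omega
    · have : a ∉ List.filter q numbers := by
        simp only [List.mem_filter]
        exact fun h => ha h.2
      rw [List.count_eq_zero.2 this]
      omega
  have hnd1 : (List.filter q (PySem.Set.ofList numbers)).Nodup := hnd2.sublist hfsub
  have hperm : (List.filter q (PySem.Set.ofList numbers)).Perm (List.filter q numbers) := by
    apply List.perm_of_nodup_nodup_toFinset_eq hnd1 hnd2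
    ext a
    simp [PySem.Set.mem_ofList]
  exact hperm.length_eq

-- A's result in closed form
lemma pvA_eq (numbers : List Int) :
    unique_numbers numbers
      = List.filter (fun k => decide (numbers.count k = 1)) (PySem.Set.ofList numbers) := by
  unfold unique_numbers
  have hempty : (PySem.Dict.empty : PySem.Dict Int Int)
      = ⟨([] : List Int).map (fun k => (k, (0 : Int)))⟩ := rfl
  rw [hempty, pvAFold numbers [] (fun _ => 0) (fun _ _ => rfl)]
  rw [PySem.List.foldl_append_if (fun kv : Int × Int => kv.2 == 1) Prod.fst]
  simp only [List.nil_append]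
  rw [List.filter_map, List.map_map]
  have h1 : (Prod.fst ∘ fun k : Int => (k, (0 : Int) + (numbers.count k : Int))) = id := rfl
  rw [h1, List.map_id]
  apply List.filter_congr
  intro k _
  simp only [Function.comp_apply, zero_add]
  by_cases hcc : numbers.count k = 1
  · simp [hcc]
  · simp [hcc]

-- B's result in closed form
lemma pvB_eq (numbers : List Int) :
    unique_numbers_alt numbers
      = List.filter (fun k => decide (numbers.count k = 1)) numbers := by
  unfold unique_numbers_alt
  rw [show (PySem.Set.empty : PySem.Set Int) = ([] : List Int) from rfl]
  rw [PySem.List.foldl_append_if _ (fun x : Int => x)]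
  simp only [List.nil_append, List.map_id']
  apply List.filter_congr
  intro k hk
  obtain ⟨h1, h2⟩ := pvBFold numbers [] [] k
  have hs : List.contains (List.foldl pvBStep (([] : List Int), ([] : List Int)) numbers).1 k = true := by
    rw [List.contains_eq_mem, decide_eq_true_eq]
    exact (h1.2 (Or.inr hk))
  have hd : List.contains (List.foldl pvBStep (([] : List Int), ([] : List Int)) numbers).2 k
      = decide (2 ≤ numbers.count k) := by
    rw [List.contains_eq_mem, decide_eq_decide]
    rw [h2]
    simp
  rw [hs, hd]
  have hpos : 1 ≤ numbers.count k := List.count_pos_iff.2 hk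
  by_cases hc : 2 ≤ numbers.count k
  · simp [hc]; omega
  · simp [hc]; omega

-- ===== VERDICT (by name: the statement is the Claim_ definition above) =====
theorem unique_numbers_spec : Claim_equal_unique_numbers := by
  intro numbers _
  unfold Spec_unique_numbers
  rw [pvA_eq, pvB_eq, pvFilter_dedup]
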